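-- pv_equiv track=rewrite | github.com/StarkPrince/ONLINE_JUDGES | atcoder/C_-_Jumping_Takahashi.py | pp
-- ===== SOURCE A (Python) =====
-- def pp(vc, ix, sm,  dp):
--     if ix == len(vc):
--         return 1 if sm == 0 else 0
--     if dp[ix][sm] != -1:
--         return dp[ix][sm]
--     else:
--         x = vc[ix][0]
--         y = vc[ix][1]
--         if (sm >= x and pp(vc, ix + 1, sm - x, dp)) or (sm >= y and pp(vc, ix + 1, sm - y, dp)):
--             dp[ix][sm] = 1
--         else:
--             dp[ix][sm] = 0
--         return dp[ix][sm]
-- ===== SOURCE B (Python) =====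
-- def pp(vc, ix, sm, dp):
--     n = len(vc)
--     if ix == n:
--         return 1 if sm == 0 else 0
--     c = dp[ix][sm]
--     if c != -1:
--         return c
--     x, y = vc[ix]
--     frontier = set()
--     if sm >= x:
--         frontier.add(sm - x)
--     if sm >= y:
--         frontier.add(sm - y)
--     for i in range(ix + 1, n):
--         x, y = vc[i]
--         nxt = set()
--         for s in frontier:
--             c = dp[i][s]
--             if c != -1:
--                 if c:
--                     return 1
--             else:
--                 if s >= x:
--                     nxt.add(s - x)
--                 if s >= y:
--                     nxt.add(s - y)
--         frontier = nxt
--     return 1 if 0 in frontier else 0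
-- ===== Notes on version B (the rewrite author's own statement) =====
-- stated objective: alternative
-- what changed: Replaced the top-down memoized recursion that mutates dp with an iterative forward frontier sweep (a BFS over the set of reachable remaining sums, consulting dp read-only); Pre_ restricts to the natural memo-table domain (0 <= ix <= n, 0 <= sm, nonnegative jump values, rows covering sums 0..sm) or a direct memo/base-case hit, since outside it A's negative-index wraparound and short-circuit-order IndexErrors are accidental.
-- outside the precondition, e.g. on pp([(2, 0), (0, 9)], 0, 2, [[-1, -1, -1], [-1]]): A returns 1, B raises IndexError; on pp([(5, 5)], 0, -1, [[-1, -1]]): A returns 0, B returns 0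
import Mathlib
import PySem

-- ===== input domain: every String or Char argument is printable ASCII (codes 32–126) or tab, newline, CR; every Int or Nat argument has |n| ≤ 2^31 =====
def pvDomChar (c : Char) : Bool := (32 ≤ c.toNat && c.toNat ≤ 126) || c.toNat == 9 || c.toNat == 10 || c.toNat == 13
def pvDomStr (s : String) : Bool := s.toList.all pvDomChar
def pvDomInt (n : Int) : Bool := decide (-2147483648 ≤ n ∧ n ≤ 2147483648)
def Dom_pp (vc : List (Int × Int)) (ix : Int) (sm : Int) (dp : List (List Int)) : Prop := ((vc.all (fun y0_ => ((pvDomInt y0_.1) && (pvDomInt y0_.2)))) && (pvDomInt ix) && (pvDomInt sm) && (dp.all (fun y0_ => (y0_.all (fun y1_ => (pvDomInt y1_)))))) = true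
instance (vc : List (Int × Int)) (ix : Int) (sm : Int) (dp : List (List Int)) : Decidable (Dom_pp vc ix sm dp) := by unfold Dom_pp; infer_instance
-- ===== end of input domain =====

-- B replaces A's top-down memoized recursion (which mutates dp) with an iterative forward
-- frontier sweep over the set of reachable remaining sums, consulting dp read-only; the
-- equivalence is about the return value only (A fills the passed dp table in place, B does not).


-- ===== PORT A =====
-- dp[ix][sm] read as the Python expression does (negative index wraps); the -1 default is
-- never reached inside Pre_pp (Python raises IndexError there)
def ppRead (dp : List (List Int)) (i s : Int) : Int :=
  PySem.List.pyGetD (PySem.List.pyGetD dp i []) s (-1)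

-- dp[ix][sm] = v (no-op where Python would raise; Pre_pp excludes that)
def ppWrite (dp : List (List Int)) (i s v : Int) : List (List Int) :=
  PySem.List.pySetD dp i (PySem.List.pySetD (PySem.List.pyGetD dp i []) s v)

-- the recursion of A, threading the mutated dp table; fuel vc.length+1 suffices for 0 ≤ ix
def ppRec (vc : List (Int × Int)) : Nat → Int → Int → List (List Int) → Int × List (List Int)
  | 0, _, _, dp => (0, dp)
  | fuel+1, ix, sm, dp =>
    if ix = (vc.length : Int) then (if sm = 0 then (1 : Int) else 0, dp)
    else
      let cell := ppRead dp ix sm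
      if cell ≠ -1 then (cell, dp)
      else
        let x := (PySem.List.pyGetD vc ix (0, 0)).1
        let y := (PySem.List.pyGetD vc ix (0, 0)).2
        let p1 := if x ≤ sm then ppRec vc fuel (ix+1) (sm-x) dp else (0, dp)
        if x ≤ sm ∧ p1.1 ≠ 0 then (1, ppWrite p1.2 ix sm 1)
        else
          let p2 := if y ≤ sm then ppRec vc fuel (ix+1) (sm-y) p1.2 else (0, p1.2)
          if y ≤ sm ∧ p2.1 ≠ 0 then (1, ppWrite p2.2 ix sm 1)
          else (0, ppWrite p2.2 ix sm 0)

def pp (vc : List (Int × Int)) (ix : Int) (sm : Int) (dp : List (List Int)) : Int :=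
  (ppRec vc (vc.length + 1) ix sm dp).1

-- ===== PORT B =====
-- the inner 'for s in frontier' loop of B: consume one level's frontier, building the next;
-- 'none' = the Python 'return 1' on a truthy memo cell
def ppRowB (dp : List (List Int)) (i x y : Int) :
    List Int → PySem.Set Int → Option (PySem.Set Int)
  | [], nxt => some nxt
  | s :: rest, nxt =>
    let c := PySem.List.pyGetD (PySem.List.pyGetD dp i []) s (-1)
    if c ≠ -1 then
      if c ≠ 0 then none
      else ppRowB dp i x y rest nxt
    else
      ppRowB dp i x y rest
        (let n1 := if x ≤ s then PySem.Set.add nxt (s - x) else nxt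
         if y ≤ s then PySem.Set.add n1 (s - y) else n1)

-- the outer 'for i in range(ix+1, n)' loop of B
def ppLevels (vc : List (Int × Int)) (dp : List (List Int)) :
    Nat → PySem.Set Int → Option (PySem.Set Int)
  | i, f =>
    if h : i < vc.length then
      let x := (PySem.List.pyGetD vc (i : Int) (0, 0)).1
      let y := (PySem.List.pyGetD vc (i : Int) (0, 0)).2
      match ppRowB dp (i : Int) x y f PySem.Set.empty with
      | none => none
      | some f' => ppLevels vc dp (i+1) f'
    else some f
  termination_by i _ => vc.length - i

def pp_alt (vc : List (Int × Int)) (ix : Int) (sm : Int) (dp : List (List Int)) : Int :=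
  if ix = (vc.length : Int) then (if sm = 0 then 1 else 0)
  else
    let c := PySem.List.pyGetD (PySem.List.pyGetD dp ix []) sm (-1)
    if c ≠ -1 then c
    else
      let x := (PySem.List.pyGetD vc ix (0, 0)).1
      let y := (PySem.List.pyGetD vc ix (0, 0)).2
      let f0 := PySem.Set.empty
      let f1 := if x ≤ sm then PySem.Set.add f0 (sm - x) else f0
      let f2 := if y ≤ sm then PySem.Set.add f1 (sm - y) else f1
      match ppLevels vc dp (ix.toNat + 1) f2 with
      | none => 1
      | some f => if PySem.Set.contains f 0 then 1 else 0

-- ===== PRECONDITION & SPEC =====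
-- Pre_pp = the inputs on which the Python A returns normally AND B's value is the claimed one:
-- the base case ix = len(vc); a direct memo hit (one in-range read, Python-style negative
-- indexing allowed); or the problem's natural memo-table domain: 0 ≤ ix < n, 0 ≤ sm,
-- nonnegative jump values and dp rows covering the sums 0..sm from row ix on, so that no read
-- of either program raises.  This excludes some inputs A returns on (negative-index
-- wraparound with fresh cells, and tables whose IndexErrors depend on A's short-circuit
-- order) — see the cites in claim.json.
def Pre_pp (vc : List (Int × Int)) (ix : Int) (sm : Int) (dp : List (List Int)) : Prop :=
  ix = (vc.length : Int)
  ∨ (PySem.Raise.InRange dp.length ix ∧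
      PySem.Raise.InRange (PySem.List.pyGetD dp ix []).length sm ∧ ppRead dp ix sm ≠ -1)
  ∨ (0 ≤ ix ∧ ix < (vc.length : Int) ∧ 0 ≤ sm ∧
      ∀ i : Nat, i < vc.length → ix ≤ (i : Int) →
        0 ≤ (vc.getD i ((0 : Int), (0 : Int))).1 ∧
        0 ≤ (vc.getD i ((0 : Int), (0 : Int))).2 ∧
        i < dp.length ∧ sm < ((dp.getD i []).length : Int))
instance (vc : List (Int × Int)) (ix : Int) (sm : Int) (dp : List (List Int)) : Decidable (Pre_pp vc ix sm dp) := by unfold Pre_pp; infer_instance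

def pvWitness_pp : (List (Int × Int)) × Int × Int × List (List Int) :=
  ([(1, 2)], 0, 3, [[-1, -1, -1, -1]])

def Spec_pp (vc : List (Int × Int)) (ix : Int) (sm : Int) (dp : List (List Int)) (out : Int) : Prop := out = pp_alt vc ix sm dp
instance (vc : List (Int × Int)) (ix : Int) (sm : Int) (dp : List (List Int)) (out : Int) : Decidable (Spec_pp vc ix sm dp out) := by unfold Spec_pp; infer_instance

-- ===== CLAIM (what is proved, stated in full; the proofs are below) =====
def Claim_equal_pp : Prop := ∀ (vc : List (Int × Int)) (ix : Int) (sm : Int) (dp : List (List Int)), Dom_pp vc ix sm dp → Pre_pp vc ix sm dp → Spec_pp vc ix sm dp (pp vc ix sm dp)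

-- ===== LEMMAS AND PROOFS =====

-- total read with a nonnegative index is getD
theorem getDnn {α : Type} (xs : List α) (t : Int) (d : α) (h : 0 ≤ t) :
    PySem.List.pyGetD xs t d = xs.getD t.toNat d := by
  unfold PySem.List.pyGetD PySem.List.pyGet? PySem.List.pyIdx?
  rw [if_pos h]
  split <;> rename_i h2
  · simp [List.getD]
  · have hl : xs.length ≤ t.toNat := by omega
    simp [List.getD, List.getElem?_eq_none hl]

-- the pure value of A's recursion read off the INITIAL dp table
def Wv (vc : List (Int × Int)) (dp0 : List (List Int)) (i : Nat) (s : Int) : Int :=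
  if _h : i < vc.length then
    (let cell := ppRead dp0 (i : Int) s
     if cell ≠ -1 then cell
     else
       let x := (PySem.List.pyGetD vc (i : Int) ((0 : Int), (0 : Int))).1
       let y := (PySem.List.pyGetD vc (i : Int) ((0 : Int), (0 : Int))).2
       if (x ≤ s ∧ Wv vc dp0 (i+1) (s-x) ≠ 0) ∨ (y ≤ s ∧ Wv vc dp0 (i+1) (s-y) ≠ 0)
         then 1 else 0)
  else if s = 0 then 1 else 0
termination_by vc.length - i

-- invariant of the mutated table: nonnegative cells are untouched or memoized with their pure value
def GoodDp (vc : List (Int × Int)) (dp0 dp : List (List Int)) : Prop :=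
  ∀ (i : Nat) (s : Int), 0 ≤ s →
    ppRead dp (i : Int) s = ppRead dp0 (i : Int) s ∨
    (ppRead dp0 (i : Int) s = -1 ∧ i < vc.length ∧
      ppRead dp (i : Int) s = Wv vc dp0 i s ∧ Wv vc dp0 i s ≠ -1)

theorem ppRead_ppWrite (dp : List (List Int)) (i j : Nat) (s t v : Int)
    (hs : 0 ≤ s) (ht : 0 ≤ t) :
    ppRead (ppWrite dp (i : Int) s v) (j : Int) t = ppRead dp (j : Int) t ∨
    (j = i ∧ t = s ∧ ppRead (ppWrite dp (i : Int) s v) (j : Int) t = v) := by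
  unfold ppRead ppWrite
  simp only [PySem.List.pySetD_natCast, PySem.List.pyGetD_natCast]
  rw [PySem.List.pySetD_of_nonneg (dp.getD i []) v hs]
  rw [getDnn _ t _ ht, getDnn _ t _ ht]
  by_cases hij : j = i
  · subst hij
    by_cases hi : j < dp.length
    · have hrow : (dp.set j ((dp.getD j []).set s.toNat v)).getD j [] =
          (dp.getD j []).set s.toNat v := by
        simp [List.getD, List.getElem?_set_self (by simpa using hi)]
      rw [hrow]
      by_cases hst : t.toNat = s.toNat
      · have hts : t = s := by omega
        subst hts
        by_cases hsl : t.toNat < (dp.getD j []).length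
        · right; refine ⟨rfl, rfl, ?_⟩
          have hsl' : t.toNat < (dp[j]?.getD []).length := by simpa [List.getD] using hsl
          simp [List.getD, List.getElem?_set_self hsl']
        · left
          rw [List.set_eq_of_length_le (by omega)]
      · left
        simp only [List.getD, List.getElem?_set]
        rw [if_neg (by omega)]
    · left
      rw [List.set_eq_of_length_le (by omega)]
  · left
    have hne : (dp.set i ((dp[i]?.getD []).set s.toNat v))[j]? = dp[j]? :=
      List.getElem?_set_ne (fun h => hij h.symm)
    simp only [List.getD, hne]

theorem good_write (vc : List (Int × Int)) (dp0 dp : List (List Int)) (k : Nat) (sm v : Int)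
    (hs : 0 ≤ sm) (h : GoodDp vc dp0 dp) (hk : k < vc.length)
    (h0 : ppRead dp0 (k : Int) sm = -1) (hv : v = Wv vc dp0 k sm)
    (hne : Wv vc dp0 k sm ≠ -1) : GoodDp vc dp0 (ppWrite dp (k : Int) sm v) := by
  intro j t htn
  rcases ppRead_ppWrite dp k j sm t v hs htn with heq | ⟨hj, hts, hval⟩
  · rw [heq]; exact h j t htn
  · subst hj; subst hts; subst hv
    exact Or.inr ⟨h0, hk, hval, hne⟩

theorem ppRec_go (vc : List (Int × Int)) (dp0 : List (List Int)) :
    ∀ (fuel k : Nat) (sm : Int) (dp : List (List Int)),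
      GoodDp vc dp0 dp → k ≤ vc.length → vc.length - k < fuel → 0 ≤ sm →
      (ppRec vc fuel (k : Int) sm dp).1 = Wv vc dp0 k sm ∧
      GoodDp vc dp0 (ppRec vc fuel (k : Int) sm dp).2 := by
  intro fuel
  induction fuel with
  | zero => intro k sm dp _ hk hf hs; omega
  | succ fuel ih =>
    intro k sm dp hgd hk hf hs
    by_cases hkn : k = vc.length
    · subst hkn
      simp only [ppRec, if_true]
      refine ⟨?_, hgd⟩
      rw [Wv]
      simp
    · have hklt : k < vc.length := by omega
      have hne : ¬ ((k : Int) = (vc.length : Int)) := by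
        intro h; exact hkn (by exact_mod_cast h)
      have hcast : ((k : Int) + 1) = ((k + 1 : Nat) : Int) := by push_cast; ring
      simp only [ppRec, if_neg hne]
      rcases hgd k sm hs with hbase | ⟨h0, _, hmemo, hne1⟩
      · by_cases hc : ppRead dp0 (k : Int) sm = -1
        · -- fresh cell: compute both children via the induction hypothesis
          rw [hbase, if_neg (by simp [hc])]
          set x := (PySem.List.pyGetD vc (k : Int) ((0 : Int), (0 : Int))).1 with hx
          set y := (PySem.List.pyGetD vc (k : Int) ((0 : Int), (0 : Int))).2 with hy
          have hW : Wv vc dp0 k sm =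
              if (x ≤ sm ∧ Wv vc dp0 (k+1) (sm-x) ≠ 0) ∨ (y ≤ sm ∧ Wv vc dp0 (k+1) (sm-y) ≠ 0)
                then 1 else 0 := by
            rw [Wv]
            simp only [hklt, dif_pos, hc, ← hx, ← hy]
            simp
          have hWne : Wv vc dp0 k sm ≠ -1 := by rw [hW]; split <;> omega
          have hp1 : ((if x ≤ sm then ppRec vc fuel ((k:Int)+1) (sm-x) dp else (0, dp)).1 =
                (if x ≤ sm then Wv vc dp0 (k+1) (sm-x) else 0)) ∧
              GoodDp vc dp0 (if x ≤ sm then ppRec vc fuel ((k:Int)+1) (sm-x) dp else (0, dp)).2 := by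
            by_cases hxg : x ≤ sm
            · rw [if_pos hxg, if_pos hxg, hcast]
              exact ih (k+1) (sm-x) dp hgd (by omega) (by omega) (by omega)
            · rw [if_neg hxg, if_neg hxg]; exact ⟨rfl, hgd⟩
          obtain ⟨he1, hg1⟩ := hp1
          by_cases hc1 : x ≤ sm ∧
              (if x ≤ sm then ppRec vc fuel ((k:Int)+1) (sm-x) dp else (0, dp)).1 ≠ 0
          · rw [if_pos hc1]
            have hC : Wv vc dp0 k sm = 1 := by
              refine hW.trans (if_pos (Or.inl ⟨hc1.1, ?_⟩))
              have hh := hc1.2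
              rw [he1, if_pos hc1.1] at hh
              exact hh
            exact ⟨by simpa using hC.symm, by
              exact good_write vc dp0 _ k sm 1 hs hg1 hklt hc hC.symm hWne⟩
          · rw [if_neg hc1]
            have hnc1 : ¬ (x ≤ sm ∧ Wv vc dp0 (k+1) (sm-x) ≠ 0) := by
              intro ⟨ha, hb⟩
              exact hc1 ⟨ha, by rw [he1, if_pos ha]; exact hb⟩
            have hp2 : ((if y ≤ sm then ppRec vc fuel ((k:Int)+1) (sm-y)
                    (if x ≤ sm then ppRec vc fuel ((k:Int)+1) (sm-x) dp else (0, dp)).2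
                  else (0, (if x ≤ sm then ppRec vc fuel ((k:Int)+1) (sm-x) dp else (0, dp)).2)).1 =
                  (if y ≤ sm then Wv vc dp0 (k+1) (sm-y) else 0)) ∧
                GoodDp vc dp0 (if y ≤ sm then ppRec vc fuel ((k:Int)+1) (sm-y)
                    (if x ≤ sm then ppRec vc fuel ((k:Int)+1) (sm-x) dp else (0, dp)).2
                  else (0, (if x ≤ sm then ppRec vc fuel ((k:Int)+1) (sm-x) dp else (0, dp)).2)).2 := by
              by_cases hyg : y ≤ sm
              · rw [if_pos hyg, if_pos hyg, hcast]
                exact ih (k+1) (sm-y) _ hg1 (by omega) (by omega) (by omega)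
              · rw [if_neg hyg, if_neg hyg]; exact ⟨rfl, hg1⟩
            obtain ⟨he2, hg2⟩ := hp2
            by_cases hc2 : y ≤ sm ∧
                (if y ≤ sm then ppRec vc fuel ((k:Int)+1) (sm-y)
                    (if x ≤ sm then ppRec vc fuel ((k:Int)+1) (sm-x) dp else (0, dp)).2
                  else (0, (if x ≤ sm then ppRec vc fuel ((k:Int)+1) (sm-x) dp else (0, dp)).2)).1 ≠ 0
            · rw [if_pos hc2]
              have hC : Wv vc dp0 k sm = 1 := by
                refine hW.trans (if_pos (Or.inr ⟨hc2.1, ?_⟩))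
                have hh := hc2.2
                rw [he2, if_pos hc2.1] at hh
                exact hh
              exact ⟨by simpa using hC.symm, by
                exact good_write vc dp0 _ k sm 1 hs hg2 hklt hc hC.symm hWne⟩
            · rw [if_neg hc2]
              have hnc2 : ¬ (y ≤ sm ∧ Wv vc dp0 (k+1) (sm-y) ≠ 0) := by
                intro ⟨ha, hb⟩
                exact hc2 ⟨ha, by rw [he2, if_pos ha]; exact hb⟩
              have hC : Wv vc dp0 k sm = 0 := by
                rw [hW, if_neg (by tauto)]
              exact ⟨by simpa using hC.symm, by
                exact good_write vc dp0 _ k sm 0 hs hg2 hklt hc hC.symm hWne⟩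
        · -- memo hit: dp agrees with dp0 and the cell is set
          rw [hbase, if_pos (by simpa using hc)]
          refine ⟨?_, hgd⟩
          rw [Wv]
          simp only [hklt, dif_pos]
          simp [hc]
      · -- memo hit: dp carries the already-computed pure value
        rw [hmemo, if_pos (by simpa using hne1)]
        exact ⟨rfl, hgd⟩

-- top-level call on a fresh cell computes the pure value (any sm ≥ 0)
theorem pp_top (vc : List (Int × Int)) (dp : List (List Int)) (k : Nat) (sm : Int)
    (hk : k < vc.length) (hs : 0 ≤ sm) (hc : ppRead dp (k : Int) sm = -1) :
    pp vc (k : Int) sm dp = Wv vc dp k sm := by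
  have hgd : GoodDp vc dp dp := fun _ _ _ => Or.inl rfl
  exact (ppRec_go vc dp (vc.length + 1) k sm dp hgd (by omega) (by omega) hs).1

-- ===== B-side lemmas =====

-- unfolding equation for the inner loop
theorem ppRowB_cons (dp : List (List Int)) (i x y s : Int) (rest : List Int)
    (nxt : PySem.Set Int) :
    ppRowB dp i x y (s :: rest) nxt =
      if ppRead dp i s ≠ -1 then
        (if ppRead dp i s ≠ 0 then none else ppRowB dp i x y rest nxt)
      else
        ppRowB dp i x y rest
          (let n1 := if x ≤ s then PySem.Set.add nxt (s - x) else nxt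
           if y ≤ s then PySem.Set.add n1 (s - y) else n1) := rfl

-- characterization of one inner loop pass
theorem rowB_char (dp : List (List Int)) (i x y : Int) (l : List Int) :
    ∀ acc : PySem.Set Int,
    (ppRowB dp i x y l acc = none ↔
      ∃ s ∈ l, ppRead dp i s ≠ -1 ∧ ppRead dp i s ≠ 0) ∧
    (∀ f', ppRowB dp i x y l acc = some f' →
      ∀ t, t ∈ f' ↔ t ∈ acc ∨ ∃ s ∈ l, ppRead dp i s = -1 ∧
        ((x ≤ s ∧ t = s - x) ∨ (y ≤ s ∧ t = s - y))) := by
  induction l with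
  | nil =>
    intro acc
    refine ⟨by simp [ppRowB], ?_⟩
    intro f' hf t
    simp only [ppRowB, Option.some.injEq] at hf
    simp [← hf]
  | cons s rest ih =>
    intro acc
    by_cases hc : ppRead dp i s ≠ -1
    · by_cases hc0 : ppRead dp i s ≠ 0
      · rw [ppRowB_cons, if_pos hc, if_pos hc0]
        refine ⟨?_, ?_⟩
        · simp only [List.mem_cons, true_iff]
          exact ⟨s, Or.inl rfl, hc, hc0⟩
        · intro f' hf; exact absurd hf (by simp)
      · push_neg at hc0
        rw [ppRowB_cons, if_pos hc, if_neg (by simp [hc0])]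
        refine ⟨?_, ?_⟩
        · rw [(ih acc).1]
          constructor
          · rintro ⟨u, hu, h1, h2⟩; exact ⟨u, List.mem_cons_of_mem _ hu, h1, h2⟩
          · rintro ⟨u, hu, h1, h2⟩
            rcases List.mem_cons.1 hu with rfl | hu
            · exact absurd hc0 h2
            · exact ⟨u, hu, h1, h2⟩
        · intro f' hf t
          rw [(ih acc).2 f' hf t]
          constructor
          · rintro (h | ⟨u, hu, h1, h2⟩)
            · exact Or.inl h
            · exact Or.inr ⟨u, List.mem_cons_of_mem _ hu, h1, h2⟩
          · rintro (h | ⟨u, hu, h1, h2⟩)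
            · exact Or.inl h
            · rcases List.mem_cons.1 hu with rfl | hu
              · exact absurd h1 hc
              · exact Or.inr ⟨u, hu, h1, h2⟩
    · push_neg at hc
      rw [ppRowB_cons, if_neg (by simp [hc])]
      set acc2 := (let n1 := if x ≤ s then PySem.Set.add acc (s - x) else acc
           if y ≤ s then PySem.Set.add n1 (s - y) else n1) with hacc2
      have hmem : ∀ t, t ∈ acc2 ↔ t ∈ acc ∨
          (x ≤ s ∧ t = s - x) ∨ (y ≤ s ∧ t = s - y) := by
        intro t
        rw [hacc2]
        by_cases hx : x ≤ s <;> by_cases hy : y ≤ s <;>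
          simp [hx, hy, PySem.Set.mem_add] <;> tauto
      refine ⟨?_, ?_⟩
      · rw [(ih acc2).1]
        constructor
        · rintro ⟨u, hu, h1, h2⟩; exact ⟨u, List.mem_cons_of_mem _ hu, h1, h2⟩
        · rintro ⟨u, hu, h1, h2⟩
          rcases List.mem_cons.1 hu with rfl | hu
          · exact absurd hc h1
          · exact ⟨u, hu, h1, h2⟩
      · intro f' hf t
        rw [(ih acc2).2 f' hf t, hmem t]
        constructor
        · rintro ((h | h) | ⟨u, hu, h1, h2⟩)
          · exact Or.inl h
          · exact Or.inr ⟨s, List.mem_cons_self .., hc, h⟩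
          · exact Or.inr ⟨u, List.mem_cons_of_mem _ hu, h1, h2⟩
        · rintro (h | ⟨u, hu, h1, h2⟩)
          · exact Or.inl (Or.inl h)
          · rcases List.mem_cons.1 hu with rfl | hu
            · exact Or.inl (Or.inr h2)
            · exact Or.inr ⟨u, hu, h1, h2⟩

-- Wv on a memoized cell
theorem Wv_memo (vc : List (Int × Int)) (dp : List (List Int)) (i : Nat) (s : Int)
    (h : i < vc.length) (hc : ppRead dp (i : Int) s ≠ -1) :
    Wv vc dp i s = ppRead dp (i : Int) s := by
  rw [Wv]
  simp only [h, dif_pos]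
  simp [hc]

-- Wv on a fresh cell
theorem Wv_fresh (vc : List (Int × Int)) (dp : List (List Int)) (i : Nat) (s : Int)
    (h : i < vc.length) (hc : ppRead dp (i : Int) s = -1) :
    Wv vc dp i s =
      if ((PySem.List.pyGetD vc (i : Int) ((0 : Int), (0 : Int))).1 ≤ s ∧
            Wv vc dp (i+1) (s - (PySem.List.pyGetD vc (i : Int) ((0 : Int), (0 : Int))).1) ≠ 0) ∨
         ((PySem.List.pyGetD vc (i : Int) ((0 : Int), (0 : Int))).2 ≤ s ∧
            Wv vc dp (i+1) (s - (PySem.List.pyGetD vc (i : Int) ((0 : Int), (0 : Int))).2) ≠ 0)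
        then 1 else 0 := by
  rw [Wv]
  simp only [h, dif_pos, hc]
  simp

-- the outer loop decides 'some frontier sum of level i has a truthy pure value'
theorem levels_iff (vc : List (Int × Int)) (dp : List (List Int)) :
    ∀ (i : Nat) (f : PySem.Set Int),
      ((∃ s ∈ f, Wv vc dp i s ≠ 0) ↔
        (ppLevels vc dp i f = none ∨
          ∃ f', ppLevels vc dp i f = some f' ∧ (0 : Int) ∈ f')) := by
  have key : ∀ (d i : Nat), vc.length - i ≤ d → ∀ f : PySem.Set Int,
      ((∃ s ∈ f, Wv vc dp i s ≠ 0) ↔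
        (ppLevels vc dp i f = none ∨
          ∃ f', ppLevels vc dp i f = some f' ∧ (0 : Int) ∈ f')) := by
    intro d
    induction d with
    | zero =>
      intro i hle f
      have h : ¬ i < vc.length := by omega
      rw [ppLevels, dif_neg h]
      constructor
      · rintro ⟨s, hs, hW⟩
        rw [Wv, dif_neg h] at hW
        have hs0 : s = 0 := by by_contra hne; rw [if_neg hne] at hW; exact hW rfl
        exact Or.inr ⟨f, rfl, hs0 ▸ hs⟩
      · rintro (h0 | ⟨f', hf', h0⟩)
        · exact absurd h0 (by simp)
        · refine ⟨0, by injection hf' with e; exact e ▸ h0, ?_⟩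
          rw [Wv, dif_neg h]
          simp
    | succ d ihd =>
    intro i hle f
    by_cases h : i < vc.length
    · have hIH := ihd (i+1) (by omega)
      rw [ppLevels, dif_pos h]
      set x := (PySem.List.pyGetD vc (i : Int) ((0 : Int), (0 : Int))).1 with hx
      set y := (PySem.List.pyGetD vc (i : Int) ((0 : Int), (0 : Int))).2 with hy
      cases hrow : ppRowB dp (i : Int) x y f PySem.Set.empty with
      | none =>
        simp only [hrow]
        constructor
        · intro _
          first | exact Or.inl rfl | exact Or.inl trivial | simp
        · intro _
          obtain ⟨u, hu, h1, h2⟩ := (rowB_char dp (i : Int) x y f PySem.Set.empty).1.1 hrow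
          exact ⟨u, hu, by rw [Wv_memo vc dp i u h h1]; exact h2⟩
      | some f' =>
        simp only [hrow]
        rw [← hIH f']
        have hns : ¬ ∃ s ∈ f, ppRead dp (i : Int) s ≠ -1 ∧ ppRead dp (i : Int) s ≠ 0 := by
          rw [← (rowB_char dp (i : Int) x y f PySem.Set.empty).1, hrow]
          simp
        have hmem := (rowB_char dp (i : Int) x y f PySem.Set.empty).2 f' hrow
        constructor
        · rintro ⟨s, hs, hW⟩
          by_cases hcs : ppRead dp (i : Int) s = -1
          · rw [Wv_fresh vc dp i s h hcs, ← hx, ← hy] at hW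
            rcases (by by_contra hno; rw [if_neg hno] at hW; exact hW rfl :
                (x ≤ s ∧ Wv vc dp (i+1) (s - x) ≠ 0) ∨ (y ≤ s ∧ Wv vc dp (i+1) (s - y) ≠ 0))
              with ⟨hg, hWc⟩ | ⟨hg, hWc⟩
            · exact ⟨s - x, (hmem (s - x)).2 (Or.inr ⟨s, hs, hcs, Or.inl ⟨hg, rfl⟩⟩), hWc⟩
            · exact ⟨s - y, (hmem (s - y)).2 (Or.inr ⟨s, hs, hcs, Or.inr ⟨hg, rfl⟩⟩), hWc⟩
          · exfalso
            rw [Wv_memo vc dp i s h hcs] at hW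
            exact hns ⟨s, hs, hcs, hW⟩
        · rintro ⟨t, ht, hWt⟩
          rcases (hmem t).1 ht with hemp | ⟨s, hs, h1, h2⟩
          · exact absurd hemp (by simp [PySem.Set.empty])
          · refine ⟨s, hs, ?_⟩
            rw [Wv_fresh vc dp i s h h1, ← hx, ← hy]
            rcases h2 with ⟨hg, rfl⟩ | ⟨hg, rfl⟩
            · rw [if_pos (Or.inl ⟨hg, hWt⟩)]; omega
            · rw [if_pos (Or.inr ⟨hg, hWt⟩)]; omega
    · rw [ppLevels, dif_neg h]
      constructor
      · rintro ⟨s, hs, hW⟩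
        rw [Wv, dif_neg h] at hW
        have hs0 : s = 0 := by by_contra hne; rw [if_neg hne] at hW; exact hW rfl
        exact Or.inr ⟨f, rfl, hs0 ▸ hs⟩
      · rintro (h0 | ⟨f', hf', h0⟩)
        · exact absurd h0 (by simp)
        · refine ⟨0, by injection hf' with e; exact e ▸ h0, ?_⟩
          rw [Wv, dif_neg h]
          simp
  intro i f
  exact key vc.length i (by omega) f

-- ===== VERDICT support =====
theorem pp_base_eq (vc : List (Int × Int)) (ix sm : Int) (dp : List (List Int))
    (hn : ix = (vc.length : Int)) : pp vc ix sm dp = pp_alt vc ix sm dp := by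
  unfold pp pp_alt
  simp only [ppRec]
  simp only [if_pos hn]

theorem pp_memo_eq (vc : List (Int × Int)) (ix sm : Int) (dp : List (List Int))
    (hn : ¬ ix = (vc.length : Int))
    (hc : PySem.List.pyGetD (PySem.List.pyGetD dp ix []) sm (-1) ≠ -1) :
    pp vc ix sm dp = pp_alt vc ix sm dp := by
  unfold pp pp_alt
  simp only [ppRec]
  simp only [ppRead]
  rw [if_neg hn, if_neg hn, if_pos hc, if_pos hc]

theorem pp_spec : Claim_equal_pp := by
  intro vc ix sm dp _ hpre
  unfold Spec_pp
  by_cases hn : ix = (vc.length : Int)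
  · exact pp_base_eq vc ix sm dp hn
  by_cases hcell : PySem.List.pyGetD (PySem.List.pyGetD dp ix []) sm (-1) = -1
  case neg => exact pp_memo_eq vc ix sm dp hn hcell
  case pos =>
  rcases hpre with h | ⟨_, _, hc⟩ | ⟨hix0, hixn, hsm, _⟩
  · exact absurd h hn
  · exact absurd hcell hc
  set k := ix.toNat with hk
  have hixk : ix = (k : Int) := by omega
  have hklt : k < vc.length := by omega
  rw [hixk] at hcell ⊢
  have hcr : ppRead dp (k : Int) sm = -1 := hcell
  rw [pp_top vc dp k sm hklt hsm hcr]
  unfold pp_alt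
  rw [if_neg (by rw [← hixk]; exact hn), if_neg (not_not_intro hcell)]
  simp only [Int.toNat_natCast]
  set x := (PySem.List.pyGetD vc (k : Int) ((0 : Int), (0 : Int))).1 with hx
  set y := (PySem.List.pyGetD vc (k : Int) ((0 : Int), (0 : Int))).2 with hy
  set f2 := (if y ≤ sm then
        PySem.Set.add (if x ≤ sm then PySem.Set.add PySem.Set.empty (sm - x) else PySem.Set.empty) (sm - y)
      else (if x ≤ sm then PySem.Set.add PySem.Set.empty (sm - x) else PySem.Set.empty)) with hf2
  have hmem2 : ∀ t, t ∈ f2 ↔ (x ≤ sm ∧ t = sm - x) ∨ (y ≤ sm ∧ t = sm - y) := by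
    intro t
    rw [hf2]
    by_cases h1 : x ≤ sm <;> by_cases h2 : y ≤ sm <;>
      simp [h1, h2, PySem.Set.mem_add, PySem.Set.empty] <;> tauto
  have hD : (∃ s ∈ f2, Wv vc dp (k+1) s ≠ 0) ↔
      ((x ≤ sm ∧ Wv vc dp (k+1) (sm - x) ≠ 0) ∨ (y ≤ sm ∧ Wv vc dp (k+1) (sm - y) ≠ 0)) := by
    constructor
    · rintro ⟨s, hs, hW⟩
      rcases (hmem2 s).1 hs with ⟨hg, rfl⟩ | ⟨hg, rfl⟩
      · exact Or.inl ⟨hg, hW⟩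
      · exact Or.inr ⟨hg, hW⟩
    · rintro (⟨hg, hW⟩ | ⟨hg, hW⟩)
      · exact ⟨sm - x, (hmem2 _).2 (Or.inl ⟨hg, rfl⟩), hW⟩
      · exact ⟨sm - y, (hmem2 _).2 (Or.inr ⟨hg, rfl⟩), hW⟩
  have hWtop := Wv_fresh vc dp k sm hklt hcr
  rw [← hx, ← hy] at hWtop
  have hL := levels_iff vc dp (k+1) f2
  cases hres : ppLevels vc dp (k+1) f2 with
  | none =>
    simp only [hres]
    rw [hres] at hL
    have : (x ≤ sm ∧ Wv vc dp (k+1) (sm - x) ≠ 0) ∨ (y ≤ sm ∧ Wv vc dp (k+1) (sm - y) ≠ 0) :=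
      hD.1 (hL.2 (Or.inl rfl))
    rw [hWtop, if_pos this]
  | some fr =>
    simp only [hres]
    rw [hres] at hL
    have h0 : ((x ≤ sm ∧ Wv vc dp (k+1) (sm - x) ≠ 0) ∨ (y ≤ sm ∧ Wv vc dp (k+1) (sm - y) ≠ 0))
        ↔ (0 : Int) ∈ fr := by
      rw [← hD, hL]
      constructor
      · rintro (h | ⟨f3, hf3, h3⟩)
        · exact absurd h (by simp)
        · injection hf3 with e; exact e ▸ h3
      · intro hh; exact Or.inr ⟨fr, rfl, hh⟩
    rw [hWtop]
    by_cases hcond : (x ≤ sm ∧ Wv vc dp (k+1) (sm - x) ≠ 0) ∨ (y ≤ sm ∧ Wv vc dp (k+1) (sm - y) ≠ 0)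
    · rw [if_pos hcond, if_pos (by rw [PySem.Set.contains_iff]; exact h0.1 hcond)]
    · rw [if_neg hcond, if_neg (by rw [PySem.Set.contains_iff]; exact fun hh => hcond (h0.2 hh))]
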